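-- pv_equiv track=rewrite | github.com/sritarung/LeetCode | 1751-maximum-number-of-events-that-can-be-attended-ii/1751-maximum-number-of-events-that-can-be-attended-ii.py | maxValue
-- ===== SOURCE A (Python) =====
-- from typing import List
--
-- def maxValue(events: List[List[int]], k: int) -> int:
--     memo = {}
--     events.sort()
--     def findNext(currentIndex):
--         low = currentIndex + 1
--         high = len(events)
--         target = events[currentIndex][1]
--
--         while low < high:
--             mid = (low + high) // 2
--             if events[mid][0] <= target:
--                 low = mid + 1
--             else:
--                 high = mid
--         return low
--     def dfs(i, remaining):
--         if i == len(events) or remaining == 0: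
--             return 0
--         if (i, remaining) in memo:
--             return memo[(i, remaining)]
--
--         # skip current event
--         skip = dfs(i + 1, remaining)
--
--         # take current event
--         j = findNext(i)  # binary search for next non-overlapping event
--         take = events[i][2] + dfs(j, remaining - 1)
--
--         memo[(i, remaining)] = max(take, skip)
--         return memo[(i, remaining)]
--     return dfs(0,k)
-- ===== SOURCE B (Python) =====
-- from typing import List
--
-- def maxValue(events: List[List[int]], k: int) -> int:
--     # bottom-up DP table over (event index, events still allowed), replacing A's memoized recursion
--     events.sort()
--     n = len(events)
--     kk = k if k < n else n          # more than n events can never be attended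
--     def upper(i):
--         lo, hi = i + 1, n
--         target = events[i][1]
--         while lo < hi:
--             mid = (lo + hi) // 2
--             if events[mid][0] <= target:
--                 lo = mid + 1
--             else:
--                 hi = mid
--         return lo
--     rows = [[0] * (kk + 1)]          # rows[d] = dp[n - d]; dp[i][r] = best value from events i.. with r allowed
--     for i in range(n - 1, -1, -1):
--         j = upper(i)
--         below = rows[n - 1 - i]      # dp[i + 1]
--         far = rows[n - j]            # dp[j]
--         row = [0]
--         for r in range(1, kk + 1):
--             take = events[i][2] + far[r - 1]
--             skip = below[r]
--             row.append(take if take > skip else skip)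
--         rows.append(row)
--     return rows[n][kk]
-- ===== Notes on version B (the rewrite author's own statement) =====
-- stated objective: alternative
-- what changed: The memoized top-down recursion over a (index, remaining) dict is replaced by an explicit bottom-up DP table built row by row from the last event backwards, with the attendance budget clamped to min(k, n).
-- outside the precondition, e.g. on maxValue([[1, 2, 3], [3, 4, 5]], -1): A returns 8, B returns 0; on maxValue([[1]], 0): A returns 0, B raises IndexError
import Mathlib
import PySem

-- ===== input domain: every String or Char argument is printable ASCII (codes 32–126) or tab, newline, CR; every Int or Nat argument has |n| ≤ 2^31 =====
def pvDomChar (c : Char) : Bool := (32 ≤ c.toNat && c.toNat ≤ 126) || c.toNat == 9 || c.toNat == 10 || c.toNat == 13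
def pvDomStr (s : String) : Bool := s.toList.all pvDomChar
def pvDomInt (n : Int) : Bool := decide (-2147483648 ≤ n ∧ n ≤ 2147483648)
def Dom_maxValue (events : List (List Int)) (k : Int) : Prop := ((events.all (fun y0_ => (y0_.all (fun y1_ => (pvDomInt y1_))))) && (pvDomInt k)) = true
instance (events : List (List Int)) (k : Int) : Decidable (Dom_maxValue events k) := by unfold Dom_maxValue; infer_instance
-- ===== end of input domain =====

-- B replaces A's memoized recursion with a bottom-up DP table whose budget axis is clamped to
-- len(events); both A and B sort `events` in place identically, and the equivalence proved here is
-- about the return value.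

-- ===== PORT A =====
-- the hand-written `while low < high` binary search (the same source text is A's findNext body and B's upper body)
def bsLoop (evs : List (List Int)) (target low high : Int) : Int :=
  if low < high then
    let mid := PySem.Int.floordiv (low + high) 2
    if PySem.List.pyGetD (PySem.List.pyGetD evs mid []) 0 0 ≤ target then
      bsLoop evs target (mid + 1) high
    else
      bsLoop evs target low mid
  else low
termination_by (high - low).toNat
decreasing_by
  · have h := PySem.Int.floordiv_two_mid_bounds (le_of_lt ‹low < high›)
    omega
  · have h := PySem.Int.floordiv_two_mid_bounds (le_of_lt ‹low < high›)
    have h2 : PySem.Int.floordiv (low + high) 2 < high :=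
      (PySem.Int.floordiv_lt_iff_lt_mul (by omega)).mpr (by omega)
    omega
def findNext (evs : List (List Int)) (i : Int) : Int :=
  let low := i + 1
  let high := PySem.List.len evs
  let target := PySem.List.pyGetD (PySem.List.pyGetD evs i []) 1 0
  bsLoop evs target low high
def dfsA (evs : List (List Int)) : Nat → Int → Int → PySem.Dict (Int × Int) Int → Int × PySem.Dict (Int × Int) Int
  | 0, _, _, memo => (0, memo)
  | fuel + 1, i, remaining, memo =>
    if i = PySem.List.len evs ∨ remaining = 0 then (0, memo)
    else
      match memo.get? (i, remaining) with
      | some v => (v, memo)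
      | none =>
        let s := dfsA evs fuel (i + 1) remaining memo
        let skip := s.1
        let j := findNext evs i
        let t := dfsA evs fuel j (remaining - 1) s.2
        let take := PySem.List.pyGetD (PySem.List.pyGetD evs i []) 2 0 + t.1
        let memo3 := t.2.insert (i, remaining) (max take skip)
        (memo3.getD (i, remaining) 0, memo3)

def maxValue (events : List (List Int)) (k : Int) : Int :=
  let evs := PySem.List.sorted events (fun x => x) false
  (dfsA evs (evs.length + 1) 0 k PySem.Dict.empty).1

-- ===== PORT B =====
def maxValue_alt (events : List (List Int)) (k : Int) : Int :=
  let evs := PySem.List.sorted events (fun x => x) false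
  let n : Int := evs.length
  let kk := if k < n then k else n
  let rows := (PySem.List.pyRange (n - 1) (-1) (-1)).foldl (fun rows i =>
    let j := findNext evs i
    let below := PySem.List.pyGetD rows (n - 1 - i) []
    let far := PySem.List.pyGetD rows (n - j) []
    let row := (PySem.List.pyRange 1 (kk + 1) 1).foldl (fun row r =>
      let take := PySem.List.pyGetD (PySem.List.pyGetD evs i []) 2 0 + PySem.List.pyGetD far (r - 1) 0
      let skip := PySem.List.pyGetD below r 0
      row ++ [if skip < take then take else skip]) [0]
    rows ++ [row]) [List.replicate (kk + 1).toNat 0]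
  PySem.List.pyGetD (PySem.List.pyGetD rows n []) kk 0


-- ===== PRECONDITION & SPEC =====
-- Pre_ restricts to the problem's natural domain: a non-negative budget k and events that are
-- [start, end, value] records (at least 3 entries). Outside it A still returns in two corners —
-- negative k (A's recursion then behaves as an unlimited budget) and malformed events that k = 0
-- spares A from ever reading — while B returns 0 or raises there.
def Pre_maxValue (events : List (List Int)) (k : Int) : Prop :=
  0 ≤ k ∧ ∀ e ∈ events, 3 ≤ e.length
instance (events : List (List Int)) (k : Int) : Decidable (Pre_maxValue events k) := by
  unfold Pre_maxValue; infer_instance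

def pvWitness_maxValue : List (List Int) × Int := ([[1, 2, 4], [2, 3, 5]], 1)

def Spec_maxValue (events : List (List Int)) (k : Int) (out : Int) : Prop := out = maxValue_alt events k
instance (events : List (List Int)) (k : Int) (out : Int) : Decidable (Spec_maxValue events k out) := by
  unfold Spec_maxValue; infer_instance

-- ===== CLAIM (what is proved, stated in full; the proofs are below) =====
def Claim_equal_maxValue : Prop := ∀ (events : List (List Int)) (k : Int), Dom_maxValue events k → Pre_maxValue events k → Spec_maxValue events k (maxValue events k)

-- ===== LEMMAS AND PROOFS =====

theorem le_bsLoop (evs : List (List Int)) (target low high : Int) :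
    low ≤ bsLoop evs target low high := by
  induction low, high using bsLoop.induct evs target with
  | case1 low high hlt mid htest ih =>
    have hmid : mid = PySem.Int.floordiv (low + high) 2 := rfl
    rw [bsLoop]
    simp only [if_pos hlt, ← hmid, if_pos htest]
    have := PySem.Int.floordiv_two_mid_bounds (le_of_lt hlt)
    rw [← hmid] at this
    omega
  | case2 low high hlt mid htest ih =>
    have hmid : mid = PySem.Int.floordiv (low + high) 2 := rfl
    rw [bsLoop]
    simp only [if_pos hlt, ← hmid, if_neg htest]
    exact ih
  | case3 low high h =>
    rw [bsLoop]; simp [h]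


theorem bsLoop_le (evs : List (List Int)) (target low high : Int) (h : low ≤ high) :
    bsLoop evs target low high ≤ high := by
  induction low, high using bsLoop.induct evs target with
  | case1 low high hlt mid htest ih =>
    have hmid : mid = PySem.Int.floordiv (low + high) 2 := rfl
    have h2 : PySem.Int.floordiv (low + high) 2 < high :=
      (PySem.Int.floordiv_lt_iff_lt_mul (by omega)).mpr (by omega)
    rw [← hmid] at h2
    rw [bsLoop]
    simp only [if_pos hlt, ← hmid, if_pos htest]
    exact ih (by omega)
  | case2 low high hlt mid htest ih =>
    have hmid : mid = PySem.Int.floordiv (low + high) 2 := rfl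
    have hb := PySem.Int.floordiv_two_mid_bounds (le_of_lt hlt)
    have h2 : PySem.Int.floordiv (low + high) 2 < high :=
      (PySem.Int.floordiv_lt_iff_lt_mul (by omega)).mpr (by omega)
    rw [← hmid] at hb h2
    rw [bsLoop]
    simp only [if_pos hlt, ← hmid, if_neg htest]
    have := ih (by omega)
    omega
  | case3 low high hn =>
    rw [bsLoop]; simp only [if_neg hn]; omega

theorem lt_findNext (evs : List (List Int)) (i : Int) : i + 1 ≤ findNext evs i :=
  le_bsLoop evs _ (i + 1) (PySem.List.len evs)

theorem findNext_le (evs : List (List Int)) (i : Int) (h : i < (evs.length : Int)) :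
    findNext evs i ≤ (evs.length : Int) := by
  have := bsLoop_le evs (PySem.List.pyGetD (PySem.List.pyGetD evs i []) 1 0) (i + 1)
      (PySem.List.len evs) (by simp [PySem.List.len_eq]; omega)
  simpa [findNext, PySem.List.len_eq] using this

def fspec (evs : List (List Int)) (i : Nat) (r : Int) : Int :=
  if h : i < evs.length ∧ r ≠ 0 then
    let j := (findNext evs i).toNat
    max (PySem.List.pyGetD (PySem.List.pyGetD evs (i : Int) []) 2 0 + fspec evs j (r - 1))
        (fspec evs (i + 1) r)
  else 0
termination_by evs.length - i
decreasing_by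
  · have h1 := lt_findNext evs i
    omega
  · omega

def Coherent (evs : List (List Int)) (memo : PySem.Dict (Int × Int) Int) : Prop :=
  ∀ i r v, memo.get? (i, r) = some v → 0 ≤ i ∧ v = fspec evs i.toNat r

theorem dfsA_correct (evs : List (List Int)) :
    ∀ (fuel : Nat) (i r : Int) (memo : PySem.Dict (Int × Int) Int),
      Coherent evs memo → 0 ≤ i → i ≤ (evs.length : Int) →
      ((evs.length : Int) - i).toNat < fuel →
      (dfsA evs fuel i r memo).1 = fspec evs i.toNat r ∧ Coherent evs (dfsA evs fuel i r memo).2 := by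
  intro fuel
  induction fuel with
  | zero => intro i r memo _ _ _ hf; omega
  | succ fuel ih =>
    intro i r memo hco h0 hle hf
    rw [dfsA]
    by_cases hbase : i = PySem.List.len evs ∨ r = 0
    · simp only [if_pos hbase]
      refine ⟨?_, hco⟩
      rw [fspec, dif_neg]
      simp only [PySem.List.len_eq] at hbase
      rintro ⟨hlt, hr⟩
      rcases hbase with hb | hb
      · omega
      · exact hr hb
    · simp only [if_neg hbase]
      push_neg at hbase
      simp only [PySem.List.len_eq] at hbase
      have hilt : i < (evs.length : Int) := lt_of_le_of_ne (by omega) hbase.1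
      have hfval : fspec evs i.toNat r =
          max (PySem.List.pyGetD (PySem.List.pyGetD evs i []) 2 0 +
                fspec evs (findNext evs i).toNat (r - 1))
              (fspec evs ((i + 1).toNat) r) := by
        rw [fspec, dif_pos (by constructor <;> [omega; exact hbase.2])]
        show max (PySem.List.pyGetD (PySem.List.pyGetD evs ((i.toNat : Int)) []) 2 0 +
              fspec evs (findNext evs ((i.toNat : Int))).toNat (r - 1))
            (fspec evs (i.toNat + 1) r) = _
        rw [Int.toNat_of_nonneg h0, show i.toNat + 1 = (i + 1).toNat from by omega]
      cases hmemo : memo.get? (i, r) with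
      | some v =>
        simp only
        exact ⟨(hco i r v hmemo).2, hco⟩
      | none =>
        simp only
        obtain ⟨hs1, hs2⟩ := ih (i + 1) r memo hco (by omega) (by omega) (by omega)
        have hj1 := lt_findNext evs i
        have hj2 := findNext_le evs i hilt
        obtain ⟨ht1, ht2⟩ := ih (findNext evs i) (r - 1) (dfsA evs fuel (i + 1) r memo).2 hs2
          (by omega) (by omega) (by omega)
        constructor
        · show (PySem.Dict.insert _ _ _).getD (i, r) 0 = _
          rw [PySem.Dict.getD_insert_self, hfval, ht1, hs1]
        · intro i' r' v hget
          rw [PySem.Dict.get?_insert] at hget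
          by_cases hk : (i', r') = (i, r)
          · rw [if_pos hk] at hget
            injection hget with hv
            have hi' : i' = i := congrArg Prod.fst hk
            have hr' : r' = r := congrArg Prod.snd hk
            subst hi' hr'
            refine ⟨h0, ?_⟩
            rw [← hv, hfval, ht1, hs1]
          · rw [if_neg hk] at hget
            exact ht2 i' r' v hget


theorem fspec_of_ge (evs : List (List Int)) (i : Nat) (r : Int) (h : evs.length ≤ i) :
    fspec evs i r = 0 := by
  rw [fspec, dif_neg]; omega

theorem fspec_zero (evs : List (List Int)) (i : Nat) : fspec evs i 0 = 0 := by
  rw [fspec, dif_neg]; simp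

theorem coherent_empty (evs : List (List Int)) : Coherent evs PySem.Dict.empty := by
  intro i r v h
  rw [PySem.Dict.get?_empty] at h
  cases h

theorem maxValue_eq_fspec (events : List (List Int)) (k : Int) :
    maxValue events k = fspec (PySem.List.sorted events (fun x => x) false) 0 k := by
  show (dfsA _ _ 0 k PySem.Dict.empty).1 = _
  have := (dfsA_correct (PySem.List.sorted events (fun x => x) false)
    ((PySem.List.sorted events (fun x => x) false).length + 1) 0 k PySem.Dict.empty
    (coherent_empty _) le_rfl (by omega) (by omega)).1
  simpa using this

theorem fspec_of_le (evs : List (List Int)) :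
    ∀ (d : Nat) (i : Nat) (r r' : Int), evs.length - i ≤ d →
      (evs.length : Int) - i ≤ r → (evs.length : Int) - i ≤ r' →
      fspec evs i r = fspec evs i r' := by
  intro d
  induction d with
  | zero =>
    intro i r r' hd hr hr'
    rw [fspec_of_ge evs i r (by omega), fspec_of_ge evs i r' (by omega)]
  | succ d ihd =>
    intro i r r' hd hr hr'
    by_cases hi : i < evs.length
    · have hj1 := lt_findNext evs (i : Int)
      have hskip := ihd (i + 1) r r' (by omega) (by push_cast; omega) (by push_cast; omega)
      have htake := ihd (findNext evs (i : Int)).toNat (r - 1) (r' - 1) (by omega)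
        (by omega) (by omega)
      have hl : fspec evs i r = max (PySem.List.pyGetD (PySem.List.pyGetD evs (i : Int) []) 2 0 +
          fspec evs (findNext evs (i : Int)).toNat (r - 1)) (fspec evs (i + 1) r) := by
        rw [fspec, dif_pos ⟨hi, by omega⟩]
      have hl' : fspec evs i r' = max (PySem.List.pyGetD (PySem.List.pyGetD evs (i : Int) []) 2 0 +
          fspec evs (findNext evs (i : Int)).toNat (r' - 1)) (fspec evs (i + 1) r') := by
        rw [fspec, dif_pos ⟨hi, by omega⟩]
      rw [hl, hl', hskip, htake]
    · rw [fspec_of_ge evs i r (by omega), fspec_of_ge evs i r' (by omega)]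

def stepB (evs : List (List Int)) (kk : Int) : List (List Int) → Int → List (List Int) :=
  fun rows i =>
    let j := findNext evs i
    let below := PySem.List.pyGetD rows ((evs.length : Int) - 1 - i) []
    let far := PySem.List.pyGetD rows ((evs.length : Int) - j) []
    let row := (PySem.List.pyRange 1 (kk + 1) 1).foldl (fun row r =>
      let take := PySem.List.pyGetD (PySem.List.pyGetD evs i []) 2 0 + PySem.List.pyGetD far (r - 1) 0
      let skip := PySem.List.pyGetD below r 0
      row ++ [if skip < take then take else skip]) [0]
    rows ++ [row]

def rowOf (evs : List (List Int)) (kk : Int) (i : Nat) : List Int :=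
  (List.range (kk.toNat + 1)).map (fun t : Nat => fspec evs i (t : Int))

def rowsFor (evs : List (List Int)) (kk : Int) (m : Nat) : List (List Int) :=
  (List.range (m + 1)).map (fun d => rowOf evs kk (evs.length - d))

theorem alt_eq_foldB (events : List (List Int)) (k : Int) :
    maxValue_alt events k =
      PySem.List.pyGetD
        (PySem.List.pyGetD
          ((PySem.List.pyRange (((PySem.List.sorted events (fun x => x) false).length : Int) - 1) (-1) (-1)).foldl
            (stepB (PySem.List.sorted events (fun x => x) false)
              (if k < ((PySem.List.sorted events (fun x => x) false).length : Int) then k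
               else ((PySem.List.sorted events (fun x => x) false).length : Int)))
            [List.replicate ((if k < ((PySem.List.sorted events (fun x => x) false).length : Int) then k
               else ((PySem.List.sorted events (fun x => x) false).length : Int)) + 1).toNat 0])
          ((PySem.List.sorted events (fun x => x) false).length : Int) [])
        (if k < ((PySem.List.sorted events (fun x => x) false).length : Int) then k
         else ((PySem.List.sorted events (fun x => x) false).length : Int)) 0 := rfl

theorem stepB_rowsFor (evs : List (List Int)) (kk : Int) (hkk : 0 ≤ kk) (m : Nat)
    (hm : m < evs.length) :
    stepB evs kk (rowsFor evs kk m) ((evs.length : Int) - 1 - (m : Int)) =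
      rowsFor evs kk (m + 1) := by
  have hilt : (evs.length : Int) - 1 - (m : Int) < (evs.length : Int) := by omega
  have hj1 := lt_findNext evs ((evs.length : Int) - 1 - (m : Int))
  have hj2 := findNext_le evs ((evs.length : Int) - 1 - (m : Int)) hilt
  set j := findNext evs ((evs.length : Int) - 1 - (m : Int)) with hjdef
  simp only [stepB, rowsFor]
  rw [show (evs.length : Int) - 1 - ((evs.length : Int) - 1 - (m : Int)) = ((m : Nat) : Int) from by
    push_cast; omega]
  rw [PySem.List.pyGetD_natCast, PySem.List.getD_map_range _ _ _ _ (by omega)]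
  rw [show (evs.length : Int) - j = (((evs.length : Int) - j).toNat : Int) from by omega]
  rw [PySem.List.pyGetD_natCast, PySem.List.getD_map_range _ _ _ _ (by omega)]
  rw [PySem.List.foldl_append_singleton_eq_map]
  conv_rhs => rw [List.range_succ, List.map_append]
  congr 1
  rw [List.map_singleton]
  congr 1
  apply List.ext_getElem
  · simp only [List.length_append, List.length_map, PySem.List.length_pyRange_one,
      List.length_range, List.length_singleton, rowOf]
    omega
  intro idx h1 h2
  simp only [rowOf] at h2 ⊢
  rw [List.getElem_map, List.getElem_range]
  match idx with
  | 0 =>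
    rw [List.getElem_append_left (by simp)]
    rw [Nat.cast_zero, fspec_zero]
    rfl
  | (t : Nat) + 1 =>
    have ht : t < kk.toNat := by
      simp only [List.length_map, List.length_range] at h2; omega
    rw [List.getElem_append_right (by simp)]
    simp only [List.length_singleton, Nat.add_sub_cancel, List.getElem_map,
      PySem.List.getElem_pyRange_one]
    -- now compute the column value at r = 1 + t
    rw [show (1 : Int) + (t : Int) - 1 = ((t : Nat) : Int) from by push_cast; omega]
    rw [PySem.List.pyGetD_natCast, PySem.List.getD_map_range _ _ _ _ (by omega)]
    rw [show (1 : Int) + (t : Int) = (((t + 1) : Nat) : Int) from by push_cast; omega]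
    rw [PySem.List.pyGetD_natCast, PySem.List.getD_map_range _ _ _ _ (by omega)]
    have hfs : fspec evs (evs.length - (m + 1)) (((t + 1) : Nat) : Int) =
        max (PySem.List.pyGetD (PySem.List.pyGetD evs (((evs.length - (m + 1) : Nat)) : Int) []) 2 0 +
              fspec evs (findNext evs (((evs.length - (m + 1) : Nat)) : Int)).toNat ((((t + 1) : Nat) : Int) - 1))
            (fspec evs (evs.length - (m + 1) + 1) (((t + 1) : Nat) : Int)) := by
      rw [fspec, dif_pos ⟨by omega, by push_cast; omega⟩]
    rw [show (((evs.length - (m + 1) : Nat)) : Int) = (evs.length : Int) - 1 - (m : Int) from by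
      push_cast; omega] at hfs
    rw [← hjdef] at hfs
    rw [show (((t + 1) : Nat) : Int) - 1 = ((t : Nat) : Int) from by push_cast; omega] at hfs
    rw [show evs.length - (m + 1) + 1 = evs.length - m from by omega] at hfs
    rw [show evs.length - ((evs.length : Int) - j).toNat = j.toNat from by omega]
    rw [hfs]
    omega

theorem foldB_eq (evs : List (List Int)) (kk : Int) (hkk : 0 ≤ kk) :
    ∀ (m : Nat), m ≤ evs.length →
      (((List.range m).map (fun t : Nat => (evs.length : Int) - 1 - (t : Int))).foldl (stepB evs kk)
        [List.replicate (kk + 1).toNat 0]) = rowsFor evs kk m := by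
  intro m
  induction m with
  | zero =>
    intro _
    simp only [List.range_zero, List.map_nil, List.foldl_nil, rowsFor, rowOf]
    rw [show (0:Nat) + 1 = 1 from rfl, List.range_one, List.map_cons, List.map_nil]
    congr 1
    have h1 : (kk + 1).toNat = kk.toNat + 1 := by omega
    rw [h1]
    symm
    rw [List.eq_replicate_iff]
    refine ⟨by simp, ?_⟩
    intro b hb
    simp only [List.mem_map] at hb
    obtain ⟨t, _, rfl⟩ := hb
    rw [fspec_of_ge evs (evs.length - 0) t (by omega)]
  | succ m ihm =>
    intro hm
    rw [List.range_succ, List.map_append, List.foldl_append, ihm (by omega)]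
    simp only [List.map_cons, List.map_nil, List.foldl_cons, List.foldl_nil]
    exact stepB_rowsFor evs kk hkk m (by omega)

theorem maxValue_alt_eq_fspec (events : List (List Int)) (k : Int) (hk : 0 ≤ k) :
    maxValue_alt events k =
      fspec (PySem.List.sorted events (fun x => x) false) 0
        (min k ((PySem.List.sorted events (fun x => x) false).length : Int)) := by
  rw [alt_eq_foldB]
  set evs := PySem.List.sorted events (fun x => x) false with hevs
  set kk := if k < (evs.length : Int) then k else (evs.length : Int) with hkkdef
  have hkk0 : 0 ≤ kk := by rw [hkkdef]; split_ifs <;> omega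
  have hmin : min k (evs.length : Int) = kk := by
    rw [hkkdef, min_def]; split_ifs <;> omega
  have hrange : PySem.List.pyRange ((evs.length : Int) - 1) (-1) (-1) =
      (List.range evs.length).map (fun t : Nat => (evs.length : Int) - 1 - (t : Int)) := by
    rw [PySem.List.pyRange_neg_one]
    rw [show ((evs.length : Int) - 1 - (-1)).toNat = evs.length from by omega]
  rw [hrange, foldB_eq evs kk hkk0 evs.length le_rfl]
  rw [rowsFor, show ((evs.length : Nat) : Int) = ((evs.length : Nat) : Int) from rfl]
  rw [PySem.List.pyGetD_natCast, PySem.List.getD_map_range _ _ _ _ (by omega)]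
  rw [show kk = ((kk.toNat : Nat) : Int) from by omega]
  rw [PySem.List.pyGetD_natCast, rowOf, PySem.List.getD_map_range _ _ _ _ (by omega)]
  rw [hmin, Nat.sub_self]
  rw [show ((kk.toNat : Nat) : Int) = kk from by omega]


-- ===== VERDICT (by name: the statement is the Claim_ definition above) =====
theorem maxValue_spec : Claim_equal_maxValue := by
  intro events k _ hpre
  unfold Spec_maxValue
  rw [maxValue_eq_fspec, maxValue_alt_eq_fspec _ _ hpre.1]
  set evs := PySem.List.sorted events (fun x => x) false with hevs
  by_cases h : k ≤ (evs.length : Int)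
  · rw [min_eq_left h]
  · rw [min_eq_right (by omega)]
    exact fspec_of_le evs evs.length 0 k (evs.length : Int) (by omega) (by omega) (by omega)
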